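-- pv_equiv track=rewrite | github.com/stefanagheorghita/Programare-in-Python | Lab2/ex7.py | tup
-- ===== SOURCE A (Python) =====
-- def palindrome(number):
--     reverse = int(str(number)[::-1])
--     if reverse == number:
--         return True
--     else:
--         return False
--
-- def tup(ls):
--     max_pal = 0
--     nr = 0
--     for x in ls:
--         if palindrome(x):
--             nr = nr + 1
--             if x > max_pal:
--                 max_pal = x
--     return nr, max_pal
-- ===== SOURCE B (Python) =====
-- def palindrome(number):
--     return int(str(number)[::-1]) == number
--
--
-- def tup(ls):
--     pals = sorted((x for x in ls if palindrome(x)), reverse=True)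
--     if pals and pals[0] > 0:
--         return len(pals), pals[0]
--     return len(pals), 0
-- ===== Notes on version B (the rewrite author's own statement) =====
-- stated objective: alternative
-- what changed: A's single loop with two running accumulators (count and running max) is replaced by filter-then-sort-descending: the count is the length of the filtered list and the maximum is read off as the head of the sorted list (positive head, else 0), removing any running-max scan.
import Mathlib
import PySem

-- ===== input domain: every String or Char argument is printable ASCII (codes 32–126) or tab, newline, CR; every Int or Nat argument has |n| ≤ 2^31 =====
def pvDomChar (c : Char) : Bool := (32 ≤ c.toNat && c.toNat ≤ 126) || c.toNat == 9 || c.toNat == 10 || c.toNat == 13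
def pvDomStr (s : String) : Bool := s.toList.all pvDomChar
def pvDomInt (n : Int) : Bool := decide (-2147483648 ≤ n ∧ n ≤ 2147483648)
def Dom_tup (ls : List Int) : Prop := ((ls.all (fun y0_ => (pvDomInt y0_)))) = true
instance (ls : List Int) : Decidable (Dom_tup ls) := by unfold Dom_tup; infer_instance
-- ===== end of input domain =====

-- B replaces A's single loop with two running accumulators by filter-then-sort-descending
-- (count = length of the filtered list, max = its head if positive else 0): alternative algorithm, not faster.

-- ===== PORT A =====
-- palindrome(number): int(str(number)[::-1]) == number; str[::-1] is List.reverse of the chars.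
-- Python raises ValueError where ofChars? is none (only for negative number); those inputs are outside Pre_tup.
def palindromeA (number : Int) : Bool :=
  match PySem.Int.ofChars? ((PySem.Int.toChars number).reverse) with
  | some reverse => reverse == number
  | none => false

def tup (ls : List Int) : Int × Int :=
  ls.foldl (fun (acc : Int × Int) x =>
    if palindromeA x then (acc.1 + 1, if x > acc.2 then x else acc.2) else acc) (0, 0)

-- ===== PORT B =====
-- B's helper is the same one-line numeric check as A's.
def palindromeB (number : Int) : Bool :=
  match PySem.Int.ofChars? ((PySem.Int.toChars number).reverse) with
  | some reverse => reverse == number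
  | none => false

-- pals = sorted(filtered, reverse=True); 'pals and pals[0] > 0' is the match on the head.
def tup_alt (ls : List Int) : Int × Int :=
  match PySem.List.sorted (ls.filter palindromeB) (fun y => y) true with
  | [] => (((ls.filter palindromeB).length : Int), 0)
  | p :: _ =>
      if p > 0 then (((ls.filter palindromeB).length : Int), p)
      else (((ls.filter palindromeB).length : Int), 0)

-- ===== PRECONDITION & SPEC =====
-- Pre_ excludes lists with a negative element: there both Pythons raise ValueError (int of a reversed string ending in '-').
def Pre_tup (ls : List Int) : Prop := ∀ x ∈ ls, 0 ≤ x
instance (ls : List Int) : Decidable (Pre_tup ls) := by unfold Pre_tup; infer_instance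

def pvWitness_tup : List Int := [1, 22, 13, 101, 0]

def Spec_tup (ls : List Int) (out : Int × Int) : Prop := out = tup_alt ls
instance (ls : List Int) (out : Int × Int) : Decidable (Spec_tup ls out) := by unfold Spec_tup; infer_instance

-- ===== CLAIM (what is proved, stated in full; the proofs are below) =====
def Claim_equal_tup : Prop := ∀ (ls : List Int), Dom_tup ls → Pre_tup ls → Spec_tup ls (tup ls)

-- ===== LEMMAS AND PROOFS =====

-- A's loop, with general starting accumulator, is length-of-filter plus running max over the filtered list.
theorem tup_loop_eq (ls : List Int) : ∀ (nr mp : Int),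
    ls.foldl (fun (acc : Int × Int) x =>
      if palindromeA x then (acc.1 + 1, if x > acc.2 then x else acc.2) else acc) (nr, mp)
    = (nr + ((ls.filter palindromeA).length : Int),
       (ls.filter palindromeA).foldl max mp) := by
  induction ls with
  | nil => simp
  | cons x t ih =>
    intro nr mp
    by_cases h : palindromeA x
    · have hmax : (if x > mp then x else mp) = max mp x := by
        by_cases hx : x > mp <;> simp [hx] <;> omega
      simp only [List.foldl_cons, List.filter_cons, h, if_true, ih, hmax,
        List.length_cons]
      refine Prod.ext ?_ ?_
      · push_cast; ring
      · rfl
    · simp [List.foldl_cons, h, ih]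

-- running max over a list of elements all ≤ the accumulator stays the accumulator
theorem foldl_max_const (l : List Int) : ∀ (c : Int), (∀ y ∈ l, y ≤ c) → l.foldl max c = c := by
  induction l with
  | nil => intro c _; rfl
  | cons x t ih =>
    intro c h
    have hx : x ≤ c := h x (by simp)
    have : max c x = c := by omega
    simpa [List.foldl_cons, this] using ih c (fun y hy => h y (by simp [hy]))

-- running max starting below the greatest element m reaches m
theorem foldl_max_eq (l : List Int) (m : Int) (hub : ∀ y ∈ l, y ≤ m) (hm : m ∈ l) :
    ∀ (a : Int), a ≤ m → l.foldl max a = m := by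
  induction l with
  | nil => cases hm
  | cons x t ih =>
    intro a ha
    rcases List.mem_cons.mp hm with hx | hx
    · subst hx
      have : max a m = m := by omega
      simpa [List.foldl_cons, this] using
        foldl_max_const t m (fun y hy => hub y (by simp [hy]))
    · have hxm : x ≤ m := hub x (by simp)
      have : max a x ≤ m := by omega
      exact by
        simpa [List.foldl_cons] using
          ih (fun y hy => hub y (by simp [hy])) hx (max a x) this

-- ===== VERDICT (by name: the statement is the Claim_ definition above) =====
theorem tup_spec : Claim_equal_tup := by
  intro ls _ hpre
  unfold Spec_tup tup
  rw [tup_loop_eq ls 0 0]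
  have hAB : palindromeA = palindromeB := rfl
  unfold tup_alt
  rw [hAB]
  set f := ls.filter palindromeB with hf
  match hs : PySem.List.sorted f (fun y => y) true with
  | [] =>
      have hnil : f = [] := (PySem.List.sorted_eq_nil_iff f (fun y => y) true).mp hs
      simp [hnil]
  | p :: t =>
      have hpf : p ∈ f := by
        have : p ∈ PySem.List.sorted f (fun y => y) true := by simp [hs]
        exact (PySem.List.mem_sorted f (fun y => y) true p).mp this
      have hub : ∀ y ∈ f, y ≤ p := by
        intro y hy
        exact PySem.List.key_head_sorted_rev_ge _ _ hs y hy
      have hp0 : 0 ≤ p := hpre p (List.mem_of_mem_filter hpf)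
      by_cases hpos : p > 0
      · have := foldl_max_eq f p hub hpf 0 (by omega)
        simp [hpos, this]
      · have hpz : p = 0 := by omega
        have hall : ∀ y ∈ f, y ≤ (0 : Int) := fun y hy => by
          have := hub y hy; omega
        have := foldl_max_const f 0 hall
        simp [hpos, this]
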